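-- pv_equiv track=rewrite | github.com/sil-ai/aqua-api | utils/morpheme_tokenizer.py | strip_punct
-- ===== SOURCE A (Python) =====
-- import unicodedata
--
-- def strip_punct(word: str) -> str:
--     """Strip leading/trailing Unicode punctuation from a word."""
--     start = 0
--     while start < len(word) and unicodedata.category(word[start]).startswith("P"):
--         start += 1
--     end = len(word)
--     while end > start and unicodedata.category(word[end - 1]).startswith("P"):
--         end -= 1
--     return word[start:end]
-- ===== SOURCE B (Python) =====
-- import unicodedata
--
-- def strip_punct(word: str) -> str:
--     """Strip leading/trailing Unicode punctuation from a word.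
--
--     Single pass: collect every index whose char is not punctuation,
--     then slice between the first and last kept index."""
--     kept = [i for i, c in enumerate(word) if not unicodedata.category(c).startswith("P")]
--     if not kept:
--         return ""
--     return word[kept[0]:kept[-1] + 1]
-- ===== Notes on version B (the rewrite author's own statement) =====
-- stated objective: alternative
-- what changed: Replaces the two inward-shrinking index loops with a single enumerate pass that records all non-punctuation indices and slices between the first and last of them.
import Mathlib
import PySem

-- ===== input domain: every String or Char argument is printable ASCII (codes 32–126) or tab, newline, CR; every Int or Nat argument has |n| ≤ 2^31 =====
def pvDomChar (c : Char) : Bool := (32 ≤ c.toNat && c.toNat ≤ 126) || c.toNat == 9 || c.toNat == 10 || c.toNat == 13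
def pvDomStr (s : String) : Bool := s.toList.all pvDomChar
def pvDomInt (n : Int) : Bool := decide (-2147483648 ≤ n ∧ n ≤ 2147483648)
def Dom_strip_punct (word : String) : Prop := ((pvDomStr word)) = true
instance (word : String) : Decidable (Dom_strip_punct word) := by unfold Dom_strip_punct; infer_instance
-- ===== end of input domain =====

-- B collapses A's two inward-shrinking scans into one enumerate pass that keeps every
-- non-punctuation index and slices between the first and last (objective: alternative).

-- unicodedata.category(c).startswith("P") for the printable-ASCII/tab/newline/CR domain:
-- exactly these 23 ASCII characters have a P* Unicode category; exact on Dom_strip_punct.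
def isP (c : Char) : Bool :=
  c ∈ ['!', '"', '#', '%', '&', '\'', '(', ')', '*', ',', '-', '.', '/',
       ':', ';', '?', '@', '[', '\\', ']', '_', '{', '}']

-- ===== PORT A =====
-- first while loop: advance start while word[start] is punctuation
def leadLen : List Char → Nat
  | [] => 0
  | c :: t => if isP c then leadLen t + 1 else 0

-- second while loop: decrease end while end > start and word[end-1] is punctuation
-- (getD is safe: the loop only reads index e with start ≤ e < length)
def endLoop (cs : List Char) (start : Nat) : Nat → Nat
  | 0 => 0
  | e + 1 => if start < e + 1 ∧ isP (cs.getD e ' ') then endLoop cs start e else e + 1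

def strip_punct (word : String) : String :=
  let cs := word.toList
  let start := leadLen cs
  let e := endLoop cs start cs.length
  -- word[start:e] with 0 ≤ start ≤ e ≤ len: exact as take/drop
  String.ofList ((cs.take e).drop start)

-- ===== PORT B =====
-- [i for i, c in enumerate(word) if not unicodedata.category(c).startswith("P")],
-- transliterated as one recursion carrying the running index n (exact: indices are ≥ 0)
def keptIdx (n : Nat) : List Char → List Nat
  | [] => []
  | c :: t => if isP c then keptIdx (n + 1) t else n :: keptIdx (n + 1) t

def strip_punct_alt (word : String) : String :=
  let kept := keptIdx 0 word.toList
  match kept.head?, kept.getLast? with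
  | some i, some j => String.ofList ((word.toList.take (j + 1)).drop i)  -- word[kept[0]:kept[-1]+1]
  | _, _ => ""

-- ===== PRECONDITION & SPEC =====
def Spec_strip_punct (word : String) (out : String) : Prop := out = strip_punct_alt word
instance (word : String) (out : String) : Decidable (Spec_strip_punct word out) := by unfold Spec_strip_punct; infer_instance

-- ===== CLAIM (what is proved, stated in full; the proofs are below) =====
def Claim_equal_strip_punct : Prop := ∀ (word : String), Dom_strip_punct word → Spec_strip_punct word (strip_punct word)

-- ===== LEMMAS AND PROOFS =====

-- the common canonical value: dropWhile from the left, then from the right via reverse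
def canon (cs : List Char) : List Char :=
  ((cs.dropWhile isP).reverse.dropWhile isP).reverse

theorem keptIdx_shift (t : List Char) : ∀ n, keptIdx (n + 1) t = (keptIdx n t).map (· + 1) := by
  induction t with
  | nil => intro n; simp [keptIdx]
  | cons c u ih =>
      intro n
      by_cases h : isP c <;> simp [keptIdx, h, ih]

theorem keptIdx_nil_iff (t : List Char) : ∀ n, keptIdx n t = [] ↔ ∀ c ∈ t, isP c := by
  induction t with
  | nil => intro n; simp [keptIdx]
  | cons c u ih =>
      intro n
      by_cases h : isP c <;> simp [keptIdx, h, ih]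

theorem dropWhile_reverse_nil (t : List Char) (h : ∀ c ∈ t, isP c) :
    t.reverse.dropWhile isP = [] := by
  rw [List.dropWhile_eq_nil_iff]
  intro x hx; exact h x (List.mem_reverse.mp hx)

-- trailing characterization: the last kept index j gives the right-trimmed list as take (j+1)
theorem trailing (t : List Char) : ∀ j, (keptIdx 0 t).getLast? = some j →
    (t.reverse.dropWhile isP).reverse = t.take (j + 1) := by
  induction t with
  | nil => intro j h; simp [keptIdx] at h
  | cons c u ih =>
      intro j h
      by_cases hc : isP c
      · -- kept (c::u) = map (+1) (kept u)
        rw [keptIdx, if_pos hc, keptIdx_shift] at h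
        rw [List.getLast?_map] at h
        rcases hu : (keptIdx 0 u).getLast? with _ | j'
        · simp [hu] at h
        · simp [hu] at h
          subst h
          have hne : u.reverse.dropWhile isP ≠ [] := by
            intro hnil
            have : ∀ x ∈ u, isP x := by
              intro x hx
              have := (List.dropWhile_eq_nil_iff).mp hnil x (List.mem_reverse.mpr hx)
              exact this
            have : keptIdx 0 u = [] := (keptIdx_nil_iff u 0).mpr this
            simp [this] at hu
          simp only [List.reverse_cons]
          rw [List.dropWhile_append]
          simp [List.isEmpty_iff, hne]
          exact ih j' hu
      · rw [keptIdx, if_neg hc, keptIdx_shift] at h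
        rcases hu : (keptIdx 0 u) with _ | ⟨a, l⟩
        · -- kept u empty: j = 0, everything in u is punctuation
          rw [hu] at h
          simp at h
          subst h
          have hall : ∀ x ∈ u, isP x := (keptIdx_nil_iff u 0).mp hu
          simp only [List.reverse_cons]
          rw [List.dropWhile_append]
          simp [dropWhile_reverse_nil u hall, List.dropWhile, hc]
        · rw [hu] at h
          have h' : ((keptIdx 0 u).map (· + 1)).getLast? = some j := by
            rw [hu]; simpa using h
          rw [List.getLast?_map] at h'
          rcases hu2 : (keptIdx 0 u).getLast? with _ | j'
          · rw [hu] at hu2; simp [List.getLast?_eq_none_iff] at hu2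
          · simp [hu2] at h'
            subst h'
            have hne : u.reverse.dropWhile isP ≠ [] := by
              intro hnil
              have hall : ∀ x ∈ u, isP x := by
                intro x hx
                exact (List.dropWhile_eq_nil_iff).mp hnil x (List.mem_reverse.mpr hx)
              have : keptIdx 0 u = [] := (keptIdx_nil_iff u 0).mpr hall
              simp [this] at hu
            simp only [List.reverse_cons]
            rw [List.dropWhile_append]
            simp [List.isEmpty_iff, hne]
            exact ih j' hu2

-- the list-level value of B
def altList (cs : List Char) : List Char :=
  match (keptIdx 0 cs).head?, (keptIdx 0 cs).getLast? with
  | some i, some j => (cs.take (j + 1)).drop i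
  | _, _ => []

theorem canon_nil (t : List Char) (h : keptIdx 0 t = []) : canon t = [] := by
  have hall : ∀ c ∈ t, isP c := (keptIdx_nil_iff t 0).mp h
  have : t.dropWhile isP = [] := List.dropWhile_eq_nil_iff.mpr hall
  simp [canon, this]

theorem altList_canon (cs : List Char) : altList cs = canon cs := by
  induction cs with
  | nil => simp [altList, canon, keptIdx]
  | cons c t ih =>
      by_cases hc : isP c
      · have hk : keptIdx 0 (c :: t) = (keptIdx 0 t).map (· + 1) := by
          rw [keptIdx, if_pos hc, keptIdx_shift]
        have hcanon : canon (c :: t) = canon t := by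
          simp [canon, List.dropWhile, hc]
        rcases hker : keptIdx 0 t with _ | ⟨a, l⟩
        · rw [hcanon, canon_nil t hker]
          simp [altList, hk, hker]
        · -- kept t nonempty: B's slice of (c::t) shifts down to B's slice of t
          have hj : ∃ j, (keptIdx 0 t).getLast? = some j := by
            rcases h : (keptIdx 0 t).getLast? with _ | j
            · rw [hker] at h; simp [List.getLast?_eq_none_iff] at h
            · exact ⟨j, rfl⟩
          obtain ⟨j, hj⟩ := hj
          have ha : (keptIdx 0 t).head? = some a := by rw [hker]; rfl
          have hj' : (a :: l).getLast? = some j := by rw [← hker]; exact hj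
          have h1 : altList (c :: t) = (List.take (j + 1) t).drop a := by
            have hml : ((a :: l).map (fun x => x + 1)).getLast? = some (j + 1) := by
              rw [List.getLast?_map, hj']; rfl
            have hml2 : ((a + 1) :: (List.map (fun x => x + 1) l)).getLast? = some (j + 1) := by
              simpa using hml
            simp only [altList, hk, hker, List.map_cons, List.head?_cons]
            rw [hml2]
            simp [List.take_succ_cons]
          have h2 : altList t = (List.take (j + 1) t).drop a := by
            simp [altList, ha, hj]
          rw [h1, ← h2, ih, hcanon]
      · -- head of the word is kept: index 0 is in, slice = take (last+1), via `trailing`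
        have hk : keptIdx 0 (c :: t) = 0 :: (keptIdx 0 t).map (· + 1) := by
          rw [keptIdx, if_neg hc, keptIdx_shift]
        have hj : ∃ j, (keptIdx 0 (c :: t)).getLast? = some j := by
          rcases h : (keptIdx 0 (c :: t)).getLast? with _ | j
          · rw [hk] at h; simp [List.getLast?_eq_none_iff] at h
          · exact ⟨j, rfl⟩
        obtain ⟨j, hj⟩ := hj
        have hh : (keptIdx 0 (c :: t)).head? = some 0 := by rw [hk]; rfl
        have h1 : altList (c :: t) = List.take (j + 1) (c :: t) := by
          simp [altList, hh, hj]
        have hdw : (c :: t).dropWhile isP = c :: t := by simp [List.dropWhile, hc]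
        rw [h1, canon, hdw, trailing (c :: t) j hj]

theorem drop_leadLen (cs : List Char) : cs.drop (leadLen cs) = cs.dropWhile isP := by
  induction cs with
  | nil => simp [leadLen]
  | cons c t ih => by_cases h : isP c <;> simp [leadLen, h, List.dropWhile, ih]

theorem leadLen_le (cs : List Char) : leadLen cs ≤ cs.length := by
  induction cs with
  | nil => simp [leadLen]
  | cons c t ih => by_cases h : isP c <;> simp [leadLen, h] <;> omega

-- invariant of A's second while loop: it returns start + |window with trailing punct removed|
theorem endLoop_eq (cs : List Char) (start : Nat) :
    ∀ e, start ≤ e → e ≤ cs.length →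
      endLoop cs start e = start + (((cs.take e).drop start).reverse.dropWhile isP).length := by
  intro e
  induction e with
  | zero => intro h1 _; interval_cases start; simp [endLoop]

  | succ e ih =>
      intro h1 h2
      rcases Nat.eq_or_lt_of_le h1 with heq | hlt
      · -- start = e+1: loop condition false, window empty
        have hw : (cs.take (e + 1)).drop start = [] := by
          apply List.drop_eq_nil_of_le
          simp [List.length_take]; omega
        rw [endLoop, if_neg (by omega), hw]
        simp
        omega
      · have he : e < cs.length := by omega
        have hse : start ≤ e := by omega
        have hwin : (cs.take (e + 1)).drop start = ((cs.take e).drop start) ++ [cs[e]] := by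
          rw [List.take_add_one]
          have : cs[e]? = some cs[e] := List.getElem?_eq_getElem he
          rw [this]
          simp only [Option.toList_some]
          rw [List.drop_append_of_le_length (by simp [List.length_take]; omega)]
        have hgetD : cs.getD e ' ' = cs[e] := List.getD_eq_getElem cs ' ' he
        by_cases hp : isP cs[e]
        · rw [endLoop, if_pos ⟨by omega, by rw [hgetD]; exact hp⟩, ih hse (by omega), hwin]
          simp [hp]
        · rw [endLoop, if_neg (by rw [hgetD]; tauto), hwin]
          have hlen : ((cs.take e).drop start).length = e - start := by
            simp [List.length_take]; omega
          simp [hp, hlen]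
          omega

-- right-trim as a take: l.take |dropWhile p l.reverse| = (dropWhile p l.reverse).reverse
theorem take_trailing (p : Char → Bool) (l : List Char) :
    l.take (l.reverse.dropWhile p).length = (l.reverse.dropWhile p).reverse := by
  have hsplit : l.reverse = l.reverse.takeWhile p ++ l.reverse.dropWhile p :=
    (List.takeWhile_append_dropWhile).symm
  have hl : l = (l.reverse.dropWhile p).reverse ++ (l.reverse.takeWhile p).reverse := by
    conv_rhs => rw [← List.reverse_append, ← hsplit, List.reverse_reverse]
  conv_lhs => rw [hl]
  rw [List.take_left' (by simp)]

-- A's value is the canonical two-sided trim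
theorem stripA_canon (cs : List Char) :
    (cs.take (endLoop cs (leadLen cs) cs.length)).drop (leadLen cs) = canon cs := by
  have hs := drop_leadLen cs
  have h1 := endLoop_eq cs (leadLen cs) cs.length (leadLen_le cs) le_rfl
  rw [List.take_length, hs] at h1
  rw [h1, List.drop_take]
  have h2 : leadLen cs + ((cs.dropWhile isP).reverse.dropWhile isP).length - leadLen cs
       = ((cs.dropWhile isP).reverse.dropWhile isP).length := by omega
  rw [h2, hs, take_trailing isP (cs.dropWhile isP)]
  rfl

-- ===== VERDICT (by name: the statement is the Claim_ definition above) =====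
theorem alt_eq_altList (word : String) :
    strip_punct_alt word = String.ofList (altList word.toList) := by
  unfold strip_punct_alt altList
  rcases h1 : (keptIdx 0 word.toList).head? with _ | i <;>
    rcases h2 : (keptIdx 0 word.toList).getLast? with _ | j <;> simp [h1, h2]

theorem strip_punct_spec : Claim_equal_strip_punct := by
  intro word _
  unfold Spec_strip_punct strip_punct
  rw [alt_eq_altList, altList_canon, ← stripA_canon word.toList]
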